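-- pv_equiv track=rewrite | github.com/dodona-edu/feedback-prediction | src/stats/stats_predictions.py | annotations_within_k_lines
-- ===== SOURCE A (Python) =====
-- from typing import List, Set, Tuple
--
-- def annotations_within_k_lines(results_per_submission: List[List[Tuple[int, List[int], List[int]]]], k):
--     result = []
--     for submission in results_per_submission:
--         max_line = submission[-1][0]
--         res = [([], []) for _ in range(max_line + 1)]
--         for line, annotations, predictions in submission:
--             res[line][1].extend(predictions)
--             if annotations:
--                 start = max(0, line - k)
--                 stop = min(max_line + 1, line + k)
--                 for i in range(start, stop):
--                     res[i][0].extend(annotations)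
--
--         result.extend(res)
--
--     return result
-- ===== SOURCE B (Python) =====
-- def annotations_within_k_lines(results_per_submission, k):
--     result = []
--     for submission in results_per_submission:
--         n = submission[-1][0] + 1
--         preds = [[] for _ in range(n)]
--         for line, _, predictions in submission:
--             preds[line].extend(predictions)
--         anns = [[a for line, annotations, _ in submission
--                  if annotations and max(0, line - k) <= i < min(n, line + k)
--                  for a in annotations]
--                 for i in range(n)]
--         result.extend(zip(anns, preds))
--     return result
-- ===== Notes on version B (the rewrite author's own statement) =====
-- stated objective: alternative
-- what changed: A scatters each entry's annotations into every line of its +/-k window while mutating res in place; B inverts that into a per-output-line gather (one comprehension over the submission per line) and keeps only the predictions as a direct scatter, zipping the two at the end.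
import Mathlib
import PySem

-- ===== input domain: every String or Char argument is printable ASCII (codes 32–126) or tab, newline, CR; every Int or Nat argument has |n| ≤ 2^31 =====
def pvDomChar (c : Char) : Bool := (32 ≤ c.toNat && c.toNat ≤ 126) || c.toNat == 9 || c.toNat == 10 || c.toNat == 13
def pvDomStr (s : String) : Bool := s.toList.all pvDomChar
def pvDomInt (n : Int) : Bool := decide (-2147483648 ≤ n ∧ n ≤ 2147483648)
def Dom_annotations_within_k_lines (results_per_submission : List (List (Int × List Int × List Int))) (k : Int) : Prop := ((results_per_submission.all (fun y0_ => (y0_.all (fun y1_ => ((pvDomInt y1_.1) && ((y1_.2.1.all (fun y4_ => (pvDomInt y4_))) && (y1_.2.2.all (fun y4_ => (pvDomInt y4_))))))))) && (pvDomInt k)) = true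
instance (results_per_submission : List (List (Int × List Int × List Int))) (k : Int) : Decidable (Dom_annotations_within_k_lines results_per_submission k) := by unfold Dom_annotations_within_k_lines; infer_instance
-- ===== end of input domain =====

-- B spreads annotations by a per-line GATHER (one comprehension reading the submission for each
-- output line) instead of A's scatter over each entry's ±k window (objective: alternative, no speed claim).

-- read-modify-write of one list cell at a Python index (res[line][1].extend(...) / preds[line].extend(...));
-- Python raises IndexError on an invalid index — those inputs are excluded by Pre_ (the total form is a no-op there)
def pyModAt {α : Type} (xs : List α) (i : Int) (f : α → α) (d : α) : List α :=
  PySem.List.pySetD xs i (f (PySem.List.pyGetD xs i d))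

-- ===== PORT A =====
-- body of A's 'for line, annotations, predictions in submission' loop
def pvStepA (k ml : Int) (res : List (List Int × List Int)) (e : Int × List Int × List Int) :
    List (List Int × List Int) :=
  let res1 := pyModAt res e.1 (fun p => (p.1, p.2 ++ e.2.2)) ([], [])   -- res[line][1].extend(predictions)
  if e.2.1 ≠ [] then
    (PySem.List.pyRange (max 0 (e.1 - k)) (min (ml + 1) (e.1 + k)) 1).foldl
      (fun r i => pyModAt r i (fun p => (p.1 ++ e.2.1, p.2)) ([], [])) res1   -- res[i][0].extend(annotations)
  else res1

-- one submission of A's outer loop; pyGet? sub (-1) = none is Python's IndexError on submission[-1] (excluded by Pre_)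
def pvSubA (k : Int) (sub : List (Int × List Int × List Int)) : List (List Int × List Int) :=
  match PySem.List.pyGet? sub (-1) with
  | none => []
  | some last => sub.foldl (pvStepA k last.1) (List.replicate (last.1 + 1).toNat ([], []))

def annotations_within_k_lines (results_per_submission : List (List (Int × List Int × List Int))) (k : Int) : List (List Int × List Int) :=
  results_per_submission.foldl (fun result sub => result ++ pvSubA k sub) []

-- ===== PORT B =====
-- B's prediction scatter loop body: preds[line].extend(predictions)
def pvPredStep (preds : List (List Int)) (e : Int × List Int × List Int) : List (List Int) :=
  pyModAt preds e.1 (fun v => v ++ e.2.2) []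

-- one submission of B's outer loop: prediction scatter + per-line annotation gather, zipped
def pvSubB (k : Int) (sub : List (Int × List Int × List Int)) : List (List Int × List Int) :=
  match PySem.List.pyGet? sub (-1) with
  | none => []
  | some last =>
    let n : Int := last.1 + 1
    let preds := sub.foldl pvPredStep (List.replicate n.toNat [])
    let anns := (PySem.List.pyRange 0 n 1).map (fun i =>
      sub.flatMap (fun e =>
        if e.2.1 ≠ [] ∧ max 0 (e.1 - k) ≤ i ∧ i < min n (e.1 + k) then e.2.1 else []))
    anns.zip preds

def annotations_within_k_lines_alt (results_per_submission : List (List (Int × List Int × List Int))) (k : Int) : List (List Int × List Int) :=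
  results_per_submission.foldl (fun result sub => result ++ pvSubB k sub) []

-- ===== PRECONDITION & SPEC =====
-- Pre_ excludes exactly the inputs where Python A (and Python B) raise IndexError: an empty
-- submission (submission[-1]) or a line that is not a valid Python index into the res list of
-- length last_line + 1.
def Pre_annotations_within_k_lines (results_per_submission : List (List (Int × List Int × List Int))) (_k : Int) : Prop :=
  ∀ sub ∈ results_per_submission, sub ≠ [] ∧
    ∀ e ∈ sub, PySem.Raise.InRange (((sub.getLast?.map (·.1)).getD 0) + 1).toNat e.1
instance (results_per_submission : List (List (Int × List Int × List Int))) (k : Int) : Decidable (Pre_annotations_within_k_lines results_per_submission k) := by unfold Pre_annotations_within_k_lines; infer_instance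
def pvWitness_annotations_within_k_lines : (List (List (Int × List Int × List Int))) × Int :=
  ([[(0, [1], [2])]], 1)
def Spec_annotations_within_k_lines (results_per_submission : List (List (Int × List Int × List Int))) (k : Int) (out : List (List Int × List Int)) : Prop := out = annotations_within_k_lines_alt results_per_submission k
instance (results_per_submission : List (List (Int × List Int × List Int))) (k : Int) (out : List (List Int × List Int)) : Decidable (Spec_annotations_within_k_lines results_per_submission k out) := by unfold Spec_annotations_within_k_lines; infer_instance

-- ===== CLAIM (what is proved, stated in full; the proofs are below) =====
def Claim_equal_annotations_within_k_lines : Prop := ∀ (results_per_submission : List (List (Int × List Int × List Int))) (k : Int), Dom_annotations_within_k_lines results_per_submission k → Pre_annotations_within_k_lines results_per_submission k → Spec_annotations_within_k_lines results_per_submission k (annotations_within_k_lines results_per_submission k)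

-- ===== LEMMAS AND PROOFS =====

-- the annotations line i receives from a submission (what B's gather computes)
def pvGAnn (k n : Int) (sub : List (Int × List Int × List Int)) (i : Int) : List Int :=
  sub.flatMap (fun e =>
    if e.2.1 ≠ [] ∧ max 0 (e.1 - k) ≤ i ∧ i < min n (e.1 + k) then e.2.1 else [])

-- the predictions cell j receives (normalised Python index = j)
def pvGPred (n : Nat) (sub : List (Int × List Int × List Int)) (j : Nat) : List Int :=
  sub.flatMap (fun e => if PySem.List.pyIdx? n e.1 = some j then e.2.2 else [])

lemma pvPyIdx_lt {n : Nat} {i : Int} {j : Nat} (h : PySem.List.pyIdx? n i = some j) : j < n := by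
  unfold PySem.List.pyIdx? at h
  split_ifs at h <;> simp at h <;> omega

lemma pvPyIdx_of_nonneg (n : Nat) (a : Int) (ha : 0 ≤ a) :
    PySem.List.pyIdx? n a = if a < n then some a.toNat else none := by
  unfold PySem.List.pyIdx?
  simp [ha]

lemma pvModAt_getElem? {α : Type} (xs : List α) (i : Int) (f : α → α) (d : α) (j : Nat) :
    (pyModAt xs i f d)[j]? =
      xs[j]?.map (fun p => if PySem.List.pyIdx? xs.length i = some j then f p else p) := by
  unfold pyModAt PySem.List.pySetD PySem.List.pySet? PySem.List.pyGetD PySem.List.pyGet?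
  cases h : PySem.List.pyIdx? xs.length i with
  | none => simp
  | some m =>
    have hm : m < xs.length := pvPyIdx_lt h
    simp only [Option.map_some, Option.getD_some, Option.bind_some]
    rw [List.getElem?_eq_getElem hm]
    simp only [Option.getD_some, List.getElem?_set]
    by_cases hjm : m = j
    · subst hjm
      simp [hm]
    · simp [hjm]

lemma pvModAt_length {α : Type} (xs : List α) (i : Int) (f : α → α) (d : α) :
    (pyModAt xs i f d).length = xs.length := by
  unfold pyModAt PySem.List.pySetD PySem.List.pySet?
  cases PySem.List.pyIdx? xs.length i <;> simp

-- A's window scatter loop, pointwise: position j is extended iff a ≤ j < b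
lemma pvWin_getElem? (ann : List Int) :
    ∀ (m : Nat) (a b : Int) (acc : List (List Int × List Int)), (b - a).toNat = m → 0 ≤ a →
    ∀ (j : Nat),
    ((PySem.List.pyRange a b 1).foldl
        (fun r i => pyModAt r i (fun p => (p.1 ++ ann, p.2)) ([], [])) acc)[j]? =
      acc[j]?.map (fun p => if a ≤ (j : Int) ∧ (j : Int) < b then (p.1 ++ ann, p.2) else p) := by
  intro m
  induction m with
  | zero =>
    intro a b acc hm ha j
    rw [PySem.List.pyRange_one_eq_nil (by omega)]
    simp only [List.foldl_nil]
    cases acc[j]? with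
    | none => simp
    | some p => rw [Option.map_some, if_neg (by omega)]
  | succ m ih =>
    intro a b acc hm ha j
    by_cases hab : a < b
    · rw [PySem.List.pyRange_one_cons hab]
      simp only [List.foldl_cons]
      rw [ih (a+1) b _ (by omega) (by omega) j]
      rw [pvModAt_getElem?, pvPyIdx_of_nonneg _ _ ha]
      cases hacc : acc[j]? with
      | none => simp
      | some p =>
        simp only [Option.map_some]
        have hjl : j < acc.length := (List.getElem?_eq_some_iff.mp hacc).1
        have hinner : ((if a < (acc.length : Int) then some a.toNat else none) = some j) ↔ (a = (j : Int)) := by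
          split_ifs with hl
          · simp only [Option.some.injEq]; omega
          · simp only [false_iff]; omega
        simp only [hinner]
        split_ifs <;> first | rfl | omega
    · rw [PySem.List.pyRange_one_eq_nil (by omega)]
      simp only [List.foldl_nil]
      cases acc[j]? with
      | none => simp
      | some p => rw [Option.map_some, if_neg (by omega)]

lemma pvStepA_length (k ml : Int) (acc : List (List Int × List Int)) (e : Int × List Int × List Int) :
    (pvStepA k ml acc e).length = acc.length := by
  unfold pvStepA
  have : ∀ (b : List (List Int × List Int)),
      ((PySem.List.pyRange (max 0 (e.1 - k)) (min (ml + 1) (e.1 + k)) 1).foldl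
        (fun r i => pyModAt r i (fun p => (p.1 ++ e.2.1, p.2)) ([], [])) b).length = b.length := by
    intro b
    induction PySem.List.pyRange (max 0 (e.1 - k)) (min (ml + 1) (e.1 + k)) 1 generalizing b with
    | nil => rfl
    | cons x xs ihx => simp only [List.foldl_cons]; rw [ihx, pvModAt_length]
  split <;> simp only [this, pvModAt_length]

-- one step of A, pointwise: exactly this entry's gather contributions are appended at cell j
lemma pvStepA_getElem? (k ml : Int) (acc : List (List Int × List Int)) (e : Int × List Int × List Int) (j : Nat) :
    (pvStepA k ml acc e)[j]? =
      acc[j]?.map (fun p => (p.1 ++ pvGAnn k (ml + 1) [e] (j : Int), p.2 ++ pvGPred acc.length [e] j)) := by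
  unfold pvStepA pvGAnn pvGPred
  simp only [List.flatMap_cons, List.flatMap_nil, List.append_nil]
  by_cases hann : e.2.1 ≠ []
  · rw [if_pos hann]
    rw [pvWin_getElem? e.2.1 (min (ml + 1) (e.1 + k) - max 0 (e.1 - k)).toNat _ _ _ rfl (le_max_left 0 _) j]
    rw [pvModAt_getElem?]
    cases acc[j]? with
    | none => simp
    | some p =>
      simp only [Option.map_some]
      split_ifs <;> simp_all
  · rw [if_neg hann]
    rw [pvModAt_getElem?]
    cases acc[j]? with
    | none => simp
    | some p =>
      simp only [Option.map_some, Option.some.injEq]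
      split_ifs <;> simp_all

-- A's per-submission loop, pointwise
lemma pvFoldA_getElem? (k ml : Int) (sub : List (Int × List Int × List Int)) :
    ∀ (acc : List (List Int × List Int)) (j : Nat),
    (sub.foldl (pvStepA k ml) acc)[j]? =
      acc[j]?.map (fun p => (p.1 ++ pvGAnn k (ml + 1) sub (j : Int), p.2 ++ pvGPred acc.length sub j)) := by
  induction sub with
  | nil =>
    intro acc j
    simp [pvGAnn, pvGPred]
  | cons e rest ih =>
    intro acc j
    simp only [List.foldl_cons]
    rw [ih (pvStepA k ml acc e) j, pvStepA_length, pvStepA_getElem?]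
    cases acc[j]? with
    | none => simp
    | some p =>
      simp [pvGAnn, pvGPred]

-- B's prediction scatter loop, pointwise
lemma pvFoldP_getElem? (sub : List (Int × List Int × List Int)) :
    ∀ (acc : List (List Int)) (j : Nat),
    (sub.foldl pvPredStep acc)[j]? = acc[j]?.map (fun v => v ++ pvGPred acc.length sub j) := by
  induction sub with
  | nil => intro acc j; simp [pvGPred]
  | cons e rest ih =>
    intro acc j
    simp only [List.foldl_cons]
    rw [ih (pvPredStep acc e) j]
    unfold pvPredStep
    rw [pvModAt_length, pvModAt_getElem?]
    cases acc[j]? with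
    | none => simp
    | some v =>
      simp only [Option.map_some]
      split_ifs <;> simp_all [pvGPred]

-- per-submission equality of the two ports
lemma pvSub_eq (k : Int) (sub : List (Int × List Int × List Int)) : pvSubA k sub = pvSubB k sub := by
  unfold pvSubA pvSubB
  cases PySem.List.pyGet? sub (-1) with
  | none => rfl
  | some last =>
    apply List.ext_getElem?
    intro j
    dsimp only
    rw [pvFoldA_getElem? k last.1 sub _ j]
    rw [List.zip_eq_zipWith, List.getElem?_zipWith]
    rw [List.getElem?_map]
    rw [pvFoldP_getElem? sub _ j]
    simp only [List.length_replicate, List.getElem?_replicate]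
    by_cases hj : (j : Int) ≤ last.1
    · simp [pvGAnn, hj, show j < (last.1 + 1).toNat by omega]
    · simp [pvGAnn, hj, show ¬ j < (last.1 + 1).toNat by omega]

-- ===== VERDICT (by name: the statement is the Claim_ definition above) =====
theorem annotations_within_k_lines_spec : Claim_equal_annotations_within_k_lines := by
  intro rps k _ _
  unfold Spec_annotations_within_k_lines annotations_within_k_lines annotations_within_k_lines_alt
  congr 1
  funext result sub
  rw [pvSub_eq]
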